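-- pv_equiv track=rewrite | github.com/Monodaboss88/AnalysisGrid | hybrid_router.py | _extract_symbol
-- ===== SOURCE A (Python) =====
-- from typing import Dict, List, Optional, Tuple
--
-- def _extract_symbol(text: str) -> Optional[str]:
--     """Extract a stock ticker from text"""
--     # Common tickers to recognize
--     known_tickers = {
--         "SPY", "QQQ", "AAPL", "MSFT", "AMZN", "GOOGL", "GOOG", "META",
--         "TSLA", "NVDA", "AMD", "NFLX", "DIS", "BA", "JPM", "GS", "V",
--         "MA", "UNH", "JNJ", "PFE", "XOM", "CVX", "WMT", "HD", "NKE",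
--         "COST", "CRM", "ADBE", "INTC", "PYPL", "SQ", "SHOP", "UBER",
--         "ABNB", "COIN", "SNOW", "PLTR", "SOFI", "RIVN", "LCID",
--         "IWM", "DIA", "XLF", "XLE", "XLK", "GLD", "SLV", "TLT",
--         "SMCI", "ARM", "AVGO", "LLY", "PANW", "CRWD", "DDOG",
--         "NET", "ZS", "MSTR", "MU", "QCOM", "TXN", "LRCX", "AMAT",
--     }
--
--     # Common English words to NEVER treat as tickers
--     common_words = {
--         "I", "A", "AM", "PM", "THE", "FOR", "AND", "OR", "AT", "TO",
--         "IN", "ON", "IS", "IT", "MY", "ME", "DO", "IF", "UP", "NO",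
--         "SO", "HI", "OK", "OF", "AN", "AS", "BE", "BY", "HE", "WE",
--         "ALL", "ANY", "ARE", "BUT", "CAN", "DAY", "DID", "GET", "GOT",
--         "HAS", "HAD", "HER", "HIM", "HIS", "HOW", "ITS", "LET", "MAY",
--         "NEW", "NOT", "NOW", "OLD", "OUR", "OUT", "OWN", "RAN", "RUN",
--         "SAY", "SHE", "THE", "TOO", "TWO", "USE", "WAY", "WHO", "WHY",
--         "YES", "YET", "YOU", "WHAT", "WHEN", "WITH", "WILL", "SHOW",
--         "GIVE", "HAVE", "JUST", "LIKE", "LONG", "LOOK", "MAKE", "MUCH",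
--         "NEED", "PLAN", "SCAN", "SOME", "TELL", "THAT", "THEM", "THEN",
--         "THIS", "VERY", "WANT", "WERE", "YOUR", "FROM", "BEEN", "ALSO",
--         "BACK", "BEST", "BOTH", "CAME", "COME", "DEEP", "DONE", "DOWN",
--         "EACH", "EVEN", "FIND", "FULL", "GOOD", "HARD", "HELP", "HERE",
--         "HIGH", "KEEP", "KNOW", "LAST", "LEFT", "MADE", "MANY", "MORE",
--         "MOST", "MOVE", "MUST", "NAME", "ONLY", "OPEN", "OVER", "RATE",
--         "READ", "REAL", "SAID", "SAME", "TAKE", "THAN", "THEY", "TIME",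
--         "TURN", "USED", "WELL", "WENT", "WORK", "YEAR", "DOES", "LOSE",
--         "LOSS", "WINS", "STOP", "EXIT", "SELL", "HOLD", "WAIT", "ONCE",
--         "CHECK", "PRICE", "BRIEF", "ALERT", "TRADE", "STATS", "WHERE", "HIT",
--         "ABOUT", "THINK", "TODAY", "THOSE", "THEIR", "COULD", "WOULD",
--         "STILL", "AFTER", "WHICH", "THESE", "OTHER", "FIRST", "BEING",
--     }
--
--     words = text.upper().split()
--
--     # First pass: look for known tickers only
--     for word in words:
--         clean = word.strip(".,!?()[]{}$#")
--         if clean in known_tickers: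
--             return clean
--
--     # Second pass: look for ticker-like words (2-5 uppercase, not common words)
--     for word in words:
--         clean = word.strip(".,!?()[]{}$#")
--         if (clean.isalpha() and 2 <= len(clean) <= 5
--                 and clean == clean.upper()
--                 and clean not in common_words):
--             return clean
--
--     return None
-- ===== SOURCE B (Python) =====
-- from typing import Optional
--
-- _KNOWN_TICKERS = frozenset(
--     "SPY QQQ AAPL MSFT AMZN GOOGL GOOG META TSLA NVDA AMD NFLX DIS BA JPM GS V "
--     "MA UNH JNJ PFE XOM CVX WMT HD NKE COST CRM ADBE INTC PYPL SQ SHOP UBER "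
--     "ABNB COIN SNOW PLTR SOFI RIVN LCID IWM DIA XLF XLE XLK GLD SLV TLT "
--     "SMCI ARM AVGO LLY PANW CRWD DDOG NET ZS MSTR MU QCOM TXN LRCX AMAT".split()
-- )
--
-- _COMMON_LINES = (
--     "I A AM PM THE FOR AND OR AT TO IN ON IS IT MY ME DO IF UP NO",
--     "SO HI OK OF AN AS BE BY HE WE",
--     "ALL ANY ARE BUT CAN DAY DID GET GOT HAS HAD HER HIM HIS HOW ITS LET MAY",
--     "NEW NOT NOW OLD OUR OUT OWN RAN RUN SAY SHE TOO TWO USE WAY WHO WHY",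
--     "YES YET YOU WHAT WHEN WITH WILL SHOW GIVE HAVE JUST LIKE LONG LOOK MAKE MUCH",
--     "NEED PLAN SCAN SOME TELL THAT THEM THEN THIS VERY WANT WERE YOUR FROM BEEN ALSO",
--     "BACK BEST BOTH CAME COME DEEP DONE DOWN EACH EVEN FIND FULL GOOD HARD HELP HERE",
--     "HIGH KEEP KNOW LAST LEFT MADE MANY MORE MOST MOVE MUST NAME ONLY OPEN OVER RATE",
--     "READ REAL SAID SAME TAKE THAN THEY TIME TURN USED WELL WENT WORK YEAR DOES LOSE",
--     "LOSS WINS STOP EXIT SELL HOLD WAIT ONCE CHECK PRICE BRIEF ALERT TRADE STATS WHERE HIT",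
--     "ABOUT THINK TODAY THOSE THEIR COULD WOULD STILL AFTER WHICH THESE OTHER FIRST BEING",
-- )
-- _COMMON_WORDS = frozenset(w for line in _COMMON_LINES for w in line.split())
--
--
-- def _ticker_like(clean: str) -> bool:
--     """Early-reject chain for A's second-pass guard."""
--     if not clean.isalpha():
--         return False
--     if len(clean) < 2 or 5 < len(clean):
--         return False
--     if clean != clean.upper():
--         return False
--     return clean not in _COMMON_WORDS
--
--
-- def _extract_symbol(text: str) -> Optional[str]:
--     """Single pass: return known tickers eagerly, keep first ticker-like word as fallback."""
--     fallback = None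
--     for word in text.upper().split():
--         clean = word.strip(".,!?()[]{}$#")
--         if clean in _KNOWN_TICKERS:
--             return clean
--         if fallback is None and _ticker_like(clean):
--             fallback = clean
--     return fallback
-- ===== Notes on version B (the rewrite author's own statement) =====
-- stated objective: simpler
-- what changed: Replaces A's two separate passes over the word list with a single pass that returns a known ticker eagerly and records the first ticker-like word in a fallback variable; the ticker-like guard becomes an early-reject helper and the two word sets are built by splitting one whitespace-separated string each instead of literal sets.
import Mathlib
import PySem

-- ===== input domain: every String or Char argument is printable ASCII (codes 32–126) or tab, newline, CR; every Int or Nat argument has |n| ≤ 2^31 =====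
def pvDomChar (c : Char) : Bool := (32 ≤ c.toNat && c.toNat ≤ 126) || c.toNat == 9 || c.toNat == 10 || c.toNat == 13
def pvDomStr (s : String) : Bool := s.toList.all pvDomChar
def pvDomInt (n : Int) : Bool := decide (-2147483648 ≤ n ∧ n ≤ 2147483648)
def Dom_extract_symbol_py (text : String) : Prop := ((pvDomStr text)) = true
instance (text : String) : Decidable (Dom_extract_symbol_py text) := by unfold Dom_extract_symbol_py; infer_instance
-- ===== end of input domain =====

-- B merges A's two passes into one pass with a `fallback` variable, turns the ticker-like
-- guard into an early-reject chain, and builds the two word sets by splitting one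
-- whitespace-separated string each (objective: simpler).

-- ===== PORT A =====
def pvKnownTickers : List String := ["SPY", "QQQ", "AAPL", "MSFT", "AMZN", "GOOGL", "GOOG", "META",
  "TSLA", "NVDA", "AMD", "NFLX", "DIS", "BA", "JPM", "GS", "V",
  "MA", "UNH", "JNJ", "PFE", "XOM", "CVX", "WMT", "HD", "NKE",
  "COST", "CRM", "ADBE", "INTC", "PYPL", "SQ", "SHOP", "UBER",
  "ABNB", "COIN", "SNOW", "PLTR", "SOFI", "RIVN", "LCID",
  "IWM", "DIA", "XLF", "XLE", "XLK", "GLD", "SLV", "TLT",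
  "SMCI", "ARM", "AVGO", "LLY", "PANW", "CRWD", "DDOG",
  "NET", "ZS", "MSTR", "MU", "QCOM", "TXN", "LRCX", "AMAT"]

-- Python's set literal dedups the repeated "THE"; the list holds the distinct elements.
def pvCommonWords : List String := ["I", "A", "AM", "PM", "THE", "FOR", "AND", "OR", "AT", "TO",
  "IN", "ON", "IS", "IT", "MY", "ME", "DO", "IF", "UP", "NO",
  "SO", "HI", "OK", "OF", "AN", "AS", "BE", "BY", "HE", "WE",
  "ALL", "ANY", "ARE", "BUT", "CAN", "DAY", "DID", "GET", "GOT",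
  "HAS", "HAD", "HER", "HIM", "HIS", "HOW", "ITS", "LET", "MAY",
  "NEW", "NOT", "NOW", "OLD", "OUR", "OUT", "OWN", "RAN", "RUN",
  "SAY", "SHE", "TOO", "TWO", "USE", "WAY", "WHO", "WHY",
  "YES", "YET", "YOU", "WHAT", "WHEN", "WITH", "WILL", "SHOW",
  "GIVE", "HAVE", "JUST", "LIKE", "LONG", "LOOK", "MAKE", "MUCH",
  "NEED", "PLAN", "SCAN", "SOME", "TELL", "THAT", "THEM", "THEN",
  "THIS", "VERY", "WANT", "WERE", "YOUR", "FROM", "BEEN", "ALSO",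
  "BACK", "BEST", "BOTH", "CAME", "COME", "DEEP", "DONE", "DOWN",
  "EACH", "EVEN", "FIND", "FULL", "GOOD", "HARD", "HELP", "HERE",
  "HIGH", "KEEP", "KNOW", "LAST", "LEFT", "MADE", "MANY", "MORE",
  "MOST", "MOVE", "MUST", "NAME", "ONLY", "OPEN", "OVER", "RATE",
  "READ", "REAL", "SAID", "SAME", "TAKE", "THAN", "THEY", "TIME",
  "TURN", "USED", "WELL", "WENT", "WORK", "YEAR", "DOES", "LOSE",
  "LOSS", "WINS", "STOP", "EXIT", "SELL", "HOLD", "WAIT", "ONCE",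
  "CHECK", "PRICE", "BRIEF", "ALERT", "TRADE", "STATS", "WHERE", "HIT",
  "ABOUT", "THINK", "TODAY", "THOSE", "THEIR", "COULD", "WOULD",
  "STILL", "AFTER", "WHICH", "THESE", "OTHER", "FIRST", "BEING"]

-- clean = word.strip(".,!?()[]{}$#")
def pvClean (w : String) : String := PySem.Str.stripChars w ".,!?()[]{}$#"

-- A's second-pass guard, exactly as the one Python condition
def pvTickerLike (c : String) : Bool :=
  PySem.Str.strIsalpha c && decide (2 ≤ PySem.Str.len c) && decide (PySem.Str.len c ≤ 5)
    && (c == PySem.Str.upper c) && !(pvCommonWords.contains c)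

-- first pass: for word in words: if clean in known_tickers: return clean
def pvFirstPass : List String → Option String
  | [] => none
  | w :: ws =>
    let clean := pvClean w
    if pvKnownTickers.contains clean then some clean else pvFirstPass ws

-- second pass: for word in words: if ticker-like: return clean
def pvSecondPass : List String → Option String
  | [] => none
  | w :: ws =>
    let clean := pvClean w
    if pvTickerLike clean then some clean else pvSecondPass ws

def extract_symbol_py (text : String) : Option String :=
  let words := PySem.Str.split₀ (PySem.Str.upper text)
  match pvFirstPass words with
  | some c => some c
  | none => pvSecondPass words

-- ===== PORT B =====
-- the two word sets, built by splitting one whitespace-separated string each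
def pvKnownB : List String := PySem.Str.split₀
  "SPY QQQ AAPL MSFT AMZN GOOGL GOOG META TSLA NVDA AMD NFLX DIS BA JPM GS V MA UNH JNJ PFE XOM CVX WMT HD NKE COST CRM ADBE INTC PYPL SQ SHOP UBER ABNB COIN SNOW PLTR SOFI RIVN LCID IWM DIA XLF XLE XLK GLD SLV TLT SMCI ARM AVGO LLY PANW CRWD DDOG NET ZS MSTR MU QCOM TXN LRCX AMAT"

def pvCommonLines : List String := [
  "I A AM PM THE FOR AND OR AT TO IN ON IS IT MY ME DO IF UP NO",
  "SO HI OK OF AN AS BE BY HE WE",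
  "ALL ANY ARE BUT CAN DAY DID GET GOT HAS HAD HER HIM HIS HOW ITS LET MAY",
  "NEW NOT NOW OLD OUR OUT OWN RAN RUN SAY SHE TOO TWO USE WAY WHO WHY",
  "YES YET YOU WHAT WHEN WITH WILL SHOW GIVE HAVE JUST LIKE LONG LOOK MAKE MUCH",
  "NEED PLAN SCAN SOME TELL THAT THEM THEN THIS VERY WANT WERE YOUR FROM BEEN ALSO",
  "BACK BEST BOTH CAME COME DEEP DONE DOWN EACH EVEN FIND FULL GOOD HARD HELP HERE",
  "HIGH KEEP KNOW LAST LEFT MADE MANY MORE MOST MOVE MUST NAME ONLY OPEN OVER RATE",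
  "READ REAL SAID SAME TAKE THAN THEY TIME TURN USED WELL WENT WORK YEAR DOES LOSE",
  "LOSS WINS STOP EXIT SELL HOLD WAIT ONCE CHECK PRICE BRIEF ALERT TRADE STATS WHERE HIT",
  "ABOUT THINK TODAY THOSE THEIR COULD WOULD STILL AFTER WHICH THESE OTHER FIRST BEING"]

def pvCommonB : List String := pvCommonLines.flatMap PySem.Str.split₀

-- _ticker_like: early-reject chain
def pvLikeB (c : String) : Bool :=
  if !(PySem.Str.strIsalpha c) then false
  else if PySem.Str.len c < 2 || 5 < PySem.Str.len c then false
  else if !(c == PySem.Str.upper c) then false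
  else !(pvCommonB.contains c)

-- one pass over the words with the fallback accumulator
def pvLoopB : List String → Option String → Option String
  | [], fallback => fallback
  | w :: ws, fallback =>
    let clean := PySem.Str.stripChars w ".,!?()[]{}$#"
    if pvKnownB.contains clean then some clean
    else pvLoopB ws (if fallback.isNone && pvLikeB clean then some clean else fallback)

def extract_symbol_py_alt (text : String) : Option String :=
  pvLoopB (PySem.Str.split₀ (PySem.Str.upper text)) none

-- ===== PRECONDITION & SPEC =====
def Spec_extract_symbol_py (text : String) (out : Option String) : Prop := out = extract_symbol_py_alt text
instance (text : String) (out : Option String) : Decidable (Spec_extract_symbol_py text out) := by unfold Spec_extract_symbol_py; infer_instance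

-- ===== CLAIM (what is proved, stated in full; the proofs are below) =====
def Claim_equal_extract_symbol_py : Prop := ∀ (text : String), Dom_extract_symbol_py text → Spec_extract_symbol_py text (extract_symbol_py text)

-- ===== LEMMAS AND PROOFS =====
set_option maxRecDepth 100000 in
theorem pvKnownB_eq : pvKnownB = pvKnownTickers := by decide

set_option maxRecDepth 100000 in
theorem pvCommonB_eq : pvCommonB = pvCommonWords := by decide

theorem pvLikeB_eq (c : String) : pvLikeB c = pvTickerLike c := by
  unfold pvLikeB pvTickerLike
  rw [pvCommonB_eq]
  have e2 : ∀ (n : Int), decide (n < 2) = !decide (2 ≤ n) := fun n => by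
    by_cases h : n < 2 <;> simp [h] <;> omega
  have e5 : ∀ (n : Int), decide (5 < n) = !decide (n ≤ 5) := fun n => by
    by_cases h : 5 < n <;> simp [h] <;> omega
  rw [e2, e5]
  cases PySem.Str.strIsalpha c <;>
  cases c == PySem.Str.upper c <;>
  cases decide ((2:Int) ≤ PySem.Str.len c) <;>
  cases decide (PySem.Str.len c ≤ 5) <;>
  simp

theorem pvLoopB_eq (ws : List String) : ∀ (fallback : Option String),
    pvLoopB ws fallback =
      match pvFirstPass ws with
      | some c => some c
      | none => match fallback with
        | some f => some f
        | none => pvSecondPass ws := by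
  induction ws with
  | nil => intro fallback; cases fallback <;> rfl
  | cons w ws ih =>
    intro fallback
    simp only [pvLoopB, pvFirstPass, pvSecondPass, pvKnownB_eq, pvLikeB_eq, pvClean]
    by_cases hk : pvClean w ∈ pvKnownTickers
    · simp [pvClean] at hk ⊢; simp [hk]
    · simp only [pvClean] at hk
      simp only [List.contains_eq_mem, hk, decide_false, Bool.false_eq_true, if_false]
      rw [ih]
      cases fallback with
      | some f => simp
      | none =>
        by_cases ht : pvTickerLike (PySem.Str.stripChars w ".,!?()[]{}$#") <;> simp [ht]

-- ===== VERDICT (by name: the statement is the Claim_ definition above) =====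
theorem extract_symbol_py_spec : Claim_equal_extract_symbol_py := by
  intro text _
  unfold Spec_extract_symbol_py extract_symbol_py extract_symbol_py_alt
  rw [pvLoopB_eq]
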